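-- pv_equiv track=rewrite | github.com/Moniruliptv/AynaOTT | script.py | generate_count
-- ===== SOURCE A (Python) =====
-- from collections import defaultdict
--
-- CATEGORY_ORDER = [
--     "Bangla",
--     "News",
--     "Sports",
--     "Channels",
--     "documentary",
--     "English",
--     "Hindi",
--     "Indian Bangla",
--     "Kids",
--     "Latest",
--     "movie",
--     "music",
--     "Religious",
--     "Star channels",
--     "Urdhu",
--     "Weather"
-- ]
--
-- def generate_count(channels):
--     count = defaultdict(int)
--
--     for ch in channels:
--         cat = ch["category"] if ch["category"] else "Unknown"
--         count[cat] += 1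
--
--     result = {"total": len(channels)}
--
--     # ordered categories
--     for cat in CATEGORY_ORDER:
--         if cat in count:
--             result[cat] = count[cat]
--
--     # unknown / extra categories
--     for cat, val in count.items():
--         if cat not in CATEGORY_ORDER:
--             result[cat] = val
--
--     return result
-- ===== SOURCE B (Python) =====
-- from collections import Counter
--
-- CATEGORY_ORDER = [
--     "Bangla",
--     "News",
--     "Sports",
--     "Channels",
--     "documentary",
--     "English",
--     "Hindi",
--     "Indian Bangla",
--     "Kids",
--     "Latest",
--     "movie",
--     "music",
--     "Religious",
--     "Star channels",
--     "Urdhu",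
--     "Weather"
-- ]
--
-- def generate_count(channels):
--     count = Counter(ch["category"] if ch["category"] else "Unknown" for ch in channels)
--     rank = {c: i for i, c in enumerate(CATEGORY_ORDER)}
--     result = {"total": len(channels)}
--     for cat, val in sorted(count.items(), key=lambda kv: rank.get(kv[0], len(CATEGORY_ORDER))):
--         result[cat] = val
--     return result
-- ===== Notes on version B (the rewrite author's own statement) =====
-- stated objective: alternative
-- what changed: A builds the ordered output with two sequential loops (a scan of CATEGORY_ORDER checking the count dict, then a scan of the count dict for extra categories); B instead counts with collections.Counter, assigns each counted category a precomputed rank (its CATEGORY_ORDER index, 16 for extras), stably sorts the count items by rank and emits them in one loop.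
import Mathlib
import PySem

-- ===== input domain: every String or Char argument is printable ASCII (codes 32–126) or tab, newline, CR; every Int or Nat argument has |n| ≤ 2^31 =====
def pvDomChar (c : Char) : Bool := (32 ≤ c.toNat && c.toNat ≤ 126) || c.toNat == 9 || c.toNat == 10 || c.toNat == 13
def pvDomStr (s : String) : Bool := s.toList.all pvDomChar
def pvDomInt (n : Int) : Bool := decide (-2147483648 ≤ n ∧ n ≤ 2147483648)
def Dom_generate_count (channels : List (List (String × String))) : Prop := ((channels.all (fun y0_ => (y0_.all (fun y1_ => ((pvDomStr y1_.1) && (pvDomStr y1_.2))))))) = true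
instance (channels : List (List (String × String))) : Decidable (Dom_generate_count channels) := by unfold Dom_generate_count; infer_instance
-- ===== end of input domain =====

-- B replaces A's two output-building loops (a scan of CATEGORY_ORDER plus a scan of the count dict)
-- by one stable sort of the count items on a precomputed rank, then a single emission loop (objective: alternative).

-- ===== PORT A =====
def pvCategoryOrder : List String :=
  ["Bangla", "News", "Sports", "Channels", "documentary", "English", "Hindi", "Indian Bangla",
   "Kids", "Latest", "movie", "music", "Religious", "Star channels", "Urdhu", "Weather"]

-- cat = ch["category"] if ch["category"] else "Unknown" ; the 'none' branch is unreachable under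
-- Pre_generate_count (Python raises KeyError there)
def pvCat (ch : List (String × String)) : String :=
  match (PySem.Dict.mk ch).get? "category" with
  | some s => if s = "" then "Unknown" else s
  | none => "Unknown"

def generate_count (channels : List (List (String × String))) : List (String × Int) :=
  let count : PySem.Dict String Int :=
    channels.foldl (fun d ch => d.modify (pvCat ch) 0 (· + 1)) PySem.Dict.empty
  let result0 : PySem.Dict String Int := PySem.Dict.mk [("total", (channels.length : Int))]
  let result1 := pvCategoryOrder.foldl
    (fun r cat => if count.contains cat then r.insert cat (count.getD cat 0) else r) result0
  let result2 := count.items.foldl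
    (fun r kv => if pvCategoryOrder.contains kv.1 then r else r.insert kv.1 kv.2) result1
  result2.items

-- ===== PORT B =====
def generate_count_alt (channels : List (List (String × String))) : List (String × Int) :=
  let count : PySem.Dict String Int := PySem.Dict.counter (channels.map pvCat)
  let rank : PySem.Dict String Int :=
    (PySem.List.enumerate pvCategoryOrder).foldl (fun d ic => d.insert ic.2 ic.1) PySem.Dict.empty
  let result := (PySem.List.sorted count.items
      (fun kv => rank.getD kv.1 (pvCategoryOrder.length : Int)) false).foldl
    (fun r kv => r.insert kv.1 kv.2) (PySem.Dict.mk [("total", (channels.length : Int))])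
  result.items

-- ===== PRECONDITION & SPEC =====
-- Pre_ excludes exactly the channels without a "category" key, on which Python A raises KeyError.
def Pre_generate_count (channels : List (List (String × String))) : Prop :=
  ∀ ch ∈ channels, ((PySem.Dict.mk ch).contains "category") = true
instance (channels : List (List (String × String))) : Decidable (Pre_generate_count channels) := by unfold Pre_generate_count; infer_instance

def pvWitness_generate_count : (List (List (String × String))) :=
  [[("category", "News"), ("name", "a")], [("category", ""), ("name", "b")], [("category", "Extra1")]]

def Spec_generate_count (channels : List (List (String × String))) (out : List (String × Int)) : Prop := out = generate_count_alt channels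
instance (channels : List (List (String × String))) (out : List (String × Int)) : Decidable (Spec_generate_count channels out) := by unfold Spec_generate_count; infer_instance

-- ===== CLAIM (what is proved, stated in full; the proofs are below) =====
def Claim_equal_generate_count : Prop := ∀ (channels : List (List (String × String))), Dom_generate_count channels → Pre_generate_count channels → Spec_generate_count channels (generate_count channels)

-- ===== LEMMAS AND PROOFS =====

-- A's guarded insert loops are folds over the filtered lists
theorem foldl_insert_if_filter {α ν : Type} (l : List α) (p : α → Bool) (k : α → String)
    (v : α → ν) (d : PySem.Dict String ν) :
    l.foldl (fun r x => if p x then r.insert (k x) (v x) else r) d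
      = (l.filter p).foldl (fun r x => r.insert (k x) (v x)) d := by
  induction l generalizing d with
  | nil => rfl
  | cons x l ih =>
      simp only [List.foldl_cons, List.filter_cons]
      by_cases h : p x = true
      · simp [h, ih]
      · simp [h, ih]

theorem foldl_skip_if_filter {α ν : Type} (l : List α) (p : α → Bool) (k : α → String)
    (v : α → ν) (d : PySem.Dict String ν) :
    l.foldl (fun r x => if p x then r else r.insert (k x) (v x)) d
      = (l.filter (fun x => !p x)).foldl (fun r x => r.insert (k x) (v x)) d := by
  induction l generalizing d with
  | nil => rfl
  | cons x l ih =>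
      simp only [List.foldl_cons, List.filter_cons]
      by_cases h : p x = true
      · simp [h, ih]
      · simp [h, ih]

theorem insertBy_append_not_before {α : Type} (before : α → α → Bool) (x : α)
    (ys zs : List α) (h : ∀ y ∈ ys, before x y = false) :
    PySem.List.insertBy before x (ys ++ zs) = ys ++ PySem.List.insertBy before x zs := by
  induction ys with
  | nil => rfl
  | cons y ys ih =>
      have hy : before x y = false := h y (by simp)
      simp [PySem.List.insertBy, hy, ih (fun y hy => h y (by simp [hy]))]

theorem insertBy_all_before {α : Type} (before : α → α → Bool) (x : α)
    (zs : List α) (h : ∀ z ∈ zs, before x z = true) :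
    PySem.List.insertBy before x zs = x :: zs := by
  cases zs with
  | nil => rfl
  | cons z zs => simp [PySem.List.insertBy, h z (by simp)]

theorem flatMap_filter_append_of_ne {α : Type} (l : List α) (key : α → Int) (x : α)
    (is : List Nat) (hx : ∀ i ∈ is, ¬ (key x = (i : Int))) :
    is.flatMap (fun i : Nat => (l ++ [x]).filter (fun a => key a = (i : Int)))
      = is.flatMap (fun i : Nat => l.filter (fun a => key a = (i : Int))) := by
  induction is with
  | nil => rfl
  | cons i is ih =>
      have hi : ¬ (key x = (i : Int)) := hx i (by simp)
      rw [List.flatMap_cons, List.flatMap_cons, ih (fun i hi => hx i (by simp [hi]))]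
      simp [List.filter_append, hi]

-- a stable sort on Int keys bounded by N is the concatenation of the key buckets in key order
theorem sorted_eq_flatMap_buckets {α : Type} (l : List α) (key : α → Int) (N : Nat)
    (h : ∀ x ∈ l, 0 ≤ key x ∧ key x ≤ (N : Int)) :
    PySem.List.sorted l key false
      = (List.range (N + 1)).flatMap (fun i : Nat => l.filter (fun x => key x = (i : Int))) := by
  induction l using List.reverseRecOn with
  | nil => simp [PySem.List.sorted]
  | append_singleton l x ih =>
      have hx : 0 ≤ key x ∧ key x ≤ (N : Int) := h x (by simp)
      have hl : ∀ y ∈ l, 0 ≤ key y ∧ key y ≤ (N : Int) := fun y hy => h y (by simp [hy])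
      obtain ⟨j, hj, hjN⟩ : ∃ j : Nat, key x = (j : Int) ∧ j ≤ N :=
        ⟨(key x).toNat, by omega, by omega⟩
      rw [PySem.List.sorted_eq_foldl_insertBy, List.foldl_append,
          ← PySem.List.sorted_eq_foldl_insertBy, ih hl]
      simp only [List.foldl_cons, List.foldl_nil]
      have hsplit : N + 1 = (j + 1) + (N - j) := by omega
      rw [hsplit, List.range_add, List.flatMap_append, List.flatMap_append]
      rw [insertBy_append_not_before _ _ _ _ (by
        intro y hy
        simp only [List.mem_flatMap, List.mem_range, List.mem_filter] at hy
        obtain ⟨i, hi, _, hkey⟩ := hy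
        simp only [decide_eq_false_iff_not, not_lt]
        have : key y = (i : Int) := by exact_mod_cast of_decide_eq_true hkey
        omega)]
      rw [insertBy_all_before _ _ _ (by
        intro z hz
        simp only [List.mem_flatMap, List.mem_map, List.mem_range, List.mem_filter] at hz
        obtain ⟨i, ⟨i', hi', rfl⟩, _, hkey⟩ := hz
        have : key z = ((j + 1 + i' : Nat) : Int) := by exact_mod_cast of_decide_eq_true hkey
        simp only [decide_eq_true_eq]
        push_cast at this ⊢
        omega)]
      have h1 : (List.range (j + 1)).flatMap (fun i : Nat => (l ++ [x]).filter (fun a => key a = (i : Int)))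
          = (List.range (j + 1)).flatMap (fun i : Nat => l.filter (fun a => key a = (i : Int))) ++ [x] := by
        rw [List.range_succ, List.flatMap_append, List.flatMap_append,
            flatMap_filter_append_of_ne l key x (List.range j) (by
              intro i hi
              simp only [List.mem_range] at hi
              rw [hj]
              simp
              omega)]
        simp [List.flatMap_cons, List.filter_append, hj, List.append_assoc]
      have h2 : ((List.range (N - j)).map (j + 1 + ·)).flatMap
            (fun i : Nat => (l ++ [x]).filter (fun a => key a = (i : Int)))
          = ((List.range (N - j)).map (j + 1 + ·)).flatMap
            (fun i : Nat => l.filter (fun a => key a = (i : Int))) := by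
        apply flatMap_filter_append_of_ne
        intro i hi
        simp only [List.mem_map, List.mem_range] at hi
        obtain ⟨i', hi', rfl⟩ := hi
        push_cast
        omega
      rw [h1, h2]
      simp

-- B's rank lookup, written out on the 17 possible keys
theorem rankOf_cases (k : String) :
    ((PySem.List.enumerate pvCategoryOrder).foldl (fun d ic => d.insert ic.2 ic.1)
        PySem.Dict.empty).getD k (pvCategoryOrder.length : Int)
      = if k = "Bangla" then 0 else if k = "News" then 1 else if k = "Sports" then 2 else if k = "Channels" then 3 else if k = "documentary" then 4 else if k = "English" then 5 else if k = "Hindi" then 6 else if k = "Indian Bangla" then 7 else if k = "Kids" then 8 else if k = "Latest" then 9 else if k = "movie" then 10 else if k = "music" then 11 else if k = "Religious" then 12 else if k = "Star channels" then 13 else if k = "Urdhu" then 14 else if k = "Weather" then 15 else 16 := by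
  have h : (PySem.List.enumerate pvCategoryOrder).foldl (fun d ic => d.insert ic.2 ic.1)
        PySem.Dict.empty = PySem.Dict.mk
      [("Bangla", 0), ("News", 1), ("Sports", 2), ("Channels", 3), ("documentary", 4), ("English", 5), ("Hindi", 6), ("Indian Bangla", 7), ("Kids", 8), ("Latest", 9), ("movie", 10), ("music", 11), ("Religious", 12), ("Star channels", 13), ("Urdhu", 14), ("Weather", 15)] := by decide
  rw [h]
  simp only [PySem.Dict.getD, PySem.Dict.get?_mk_cons]
  rcases eq_or_ne k "Bangla" with rfl | h1
  · decide
  rcases eq_or_ne k "News" with rfl | h2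
  · decide
  rcases eq_or_ne k "Sports" with rfl | h3
  · decide
  rcases eq_or_ne k "Channels" with rfl | h4
  · decide
  rcases eq_or_ne k "documentary" with rfl | h5
  · decide
  rcases eq_or_ne k "English" with rfl | h6
  · decide
  rcases eq_or_ne k "Hindi" with rfl | h7
  · decide
  rcases eq_or_ne k "Indian Bangla" with rfl | h8
  · decide
  rcases eq_or_ne k "Kids" with rfl | h9
  · decide
  rcases eq_or_ne k "Latest" with rfl | h10
  · decide
  rcases eq_or_ne k "movie" with rfl | h11
  · decide
  rcases eq_or_ne k "music" with rfl | h12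
  · decide
  rcases eq_or_ne k "Religious" with rfl | h13
  · decide
  rcases eq_or_ne k "Star channels" with rfl | h14
  · decide
  rcases eq_or_ne k "Urdhu" with rfl | h15
  · decide
  rcases eq_or_ne k "Weather" with rfl | h16
  · decide
  simp [beq_iff_eq, pvCategoryOrder, PySem.Dict.get?, h1, Ne.symm h1, h2, Ne.symm h2, h3, Ne.symm h3, h4, Ne.symm h4, h5, Ne.symm h5, h6, Ne.symm h6, h7, Ne.symm h7, h8, Ne.symm h8, h9, Ne.symm h9, h10, Ne.symm h10, h11, Ne.symm h11, h12, Ne.symm h12, h13, Ne.symm h13, h14, Ne.symm h14, h15, Ne.symm h15, h16, Ne.symm h16]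

theorem rank_bucket_0 (K : List String) :
    K.filter (fun k => decide (((PySem.List.enumerate pvCategoryOrder).foldl
        (fun d ic => d.insert ic.2 ic.1) PySem.Dict.empty).getD k (pvCategoryOrder.length : Int) = (0 : Int)))
      = K.filter (fun k => k == "Bangla") := by
  refine List.filter_congr ?_
  intro k _
  rw [rankOf_cases]
  rcases eq_or_ne k "Bangla" with rfl | h1
  · decide
  rcases eq_or_ne k "News" with rfl | h2
  · decide
  rcases eq_or_ne k "Sports" with rfl | h3
  · decide
  rcases eq_or_ne k "Channels" with rfl | h4
  · decide
  rcases eq_or_ne k "documentary" with rfl | h5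
  · decide
  rcases eq_or_ne k "English" with rfl | h6
  · decide
  rcases eq_or_ne k "Hindi" with rfl | h7
  · decide
  rcases eq_or_ne k "Indian Bangla" with rfl | h8
  · decide
  rcases eq_or_ne k "Kids" with rfl | h9
  · decide
  rcases eq_or_ne k "Latest" with rfl | h10
  · decide
  rcases eq_or_ne k "movie" with rfl | h11
  · decide
  rcases eq_or_ne k "music" with rfl | h12
  · decide
  rcases eq_or_ne k "Religious" with rfl | h13
  · decide
  rcases eq_or_ne k "Star channels" with rfl | h14
  · decide
  rcases eq_or_ne k "Urdhu" with rfl | h15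
  · decide
  rcases eq_or_ne k "Weather" with rfl | h16
  · decide
  simp [beq_iff_eq, h1, h2, h3, h4, h5, h6, h7, h8, h9, h10, h11, h12, h13, h14, h15, h16]

theorem rank_bucket_1 (K : List String) :
    K.filter (fun k => decide (((PySem.List.enumerate pvCategoryOrder).foldl
        (fun d ic => d.insert ic.2 ic.1) PySem.Dict.empty).getD k (pvCategoryOrder.length : Int) = (1 : Int)))
      = K.filter (fun k => k == "News") := by
  refine List.filter_congr ?_
  intro k _
  rw [rankOf_cases]
  rcases eq_or_ne k "Bangla" with rfl | h1
  · decide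
  rcases eq_or_ne k "News" with rfl | h2
  · decide
  rcases eq_or_ne k "Sports" with rfl | h3
  · decide
  rcases eq_or_ne k "Channels" with rfl | h4
  · decide
  rcases eq_or_ne k "documentary" with rfl | h5
  · decide
  rcases eq_or_ne k "English" with rfl | h6
  · decide
  rcases eq_or_ne k "Hindi" with rfl | h7
  · decide
  rcases eq_or_ne k "Indian Bangla" with rfl | h8
  · decide
  rcases eq_or_ne k "Kids" with rfl | h9
  · decide
  rcases eq_or_ne k "Latest" with rfl | h10
  · decide
  rcases eq_or_ne k "movie" with rfl | h11
  · decide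
  rcases eq_or_ne k "music" with rfl | h12
  · decide
  rcases eq_or_ne k "Religious" with rfl | h13
  · decide
  rcases eq_or_ne k "Star channels" with rfl | h14
  · decide
  rcases eq_or_ne k "Urdhu" with rfl | h15
  · decide
  rcases eq_or_ne k "Weather" with rfl | h16
  · decide
  simp [beq_iff_eq, h1, h2, h3, h4, h5, h6, h7, h8, h9, h10, h11, h12, h13, h14, h15, h16]

theorem rank_bucket_2 (K : List String) :
    K.filter (fun k => decide (((PySem.List.enumerate pvCategoryOrder).foldl
        (fun d ic => d.insert ic.2 ic.1) PySem.Dict.empty).getD k (pvCategoryOrder.length : Int) = (2 : Int)))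
      = K.filter (fun k => k == "Sports") := by
  refine List.filter_congr ?_
  intro k _
  rw [rankOf_cases]
  rcases eq_or_ne k "Bangla" with rfl | h1
  · decide
  rcases eq_or_ne k "News" with rfl | h2
  · decide
  rcases eq_or_ne k "Sports" with rfl | h3
  · decide
  rcases eq_or_ne k "Channels" with rfl | h4
  · decide
  rcases eq_or_ne k "documentary" with rfl | h5
  · decide
  rcases eq_or_ne k "English" with rfl | h6
  · decide
  rcases eq_or_ne k "Hindi" with rfl | h7
  · decide
  rcases eq_or_ne k "Indian Bangla" with rfl | h8
  · decide
  rcases eq_or_ne k "Kids" with rfl | h9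
  · decide
  rcases eq_or_ne k "Latest" with rfl | h10
  · decide
  rcases eq_or_ne k "movie" with rfl | h11
  · decide
  rcases eq_or_ne k "music" with rfl | h12
  · decide
  rcases eq_or_ne k "Religious" with rfl | h13
  · decide
  rcases eq_or_ne k "Star channels" with rfl | h14
  · decide
  rcases eq_or_ne k "Urdhu" with rfl | h15
  · decide
  rcases eq_or_ne k "Weather" with rfl | h16
  · decide
  simp [beq_iff_eq, h1, h2, h3, h4, h5, h6, h7, h8, h9, h10, h11, h12, h13, h14, h15, h16]

theorem rank_bucket_3 (K : List String) :
    K.filter (fun k => decide (((PySem.List.enumerate pvCategoryOrder).foldl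
        (fun d ic => d.insert ic.2 ic.1) PySem.Dict.empty).getD k (pvCategoryOrder.length : Int) = (3 : Int)))
      = K.filter (fun k => k == "Channels") := by
  refine List.filter_congr ?_
  intro k _
  rw [rankOf_cases]
  rcases eq_or_ne k "Bangla" with rfl | h1
  · decide
  rcases eq_or_ne k "News" with rfl | h2
  · decide
  rcases eq_or_ne k "Sports" with rfl | h3
  · decide
  rcases eq_or_ne k "Channels" with rfl | h4
  · decide
  rcases eq_or_ne k "documentary" with rfl | h5
  · decide
  rcases eq_or_ne k "English" with rfl | h6
  · decide
  rcases eq_or_ne k "Hindi" with rfl | h7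
  · decide
  rcases eq_or_ne k "Indian Bangla" with rfl | h8
  · decide
  rcases eq_or_ne k "Kids" with rfl | h9
  · decide
  rcases eq_or_ne k "Latest" with rfl | h10
  · decide
  rcases eq_or_ne k "movie" with rfl | h11
  · decide
  rcases eq_or_ne k "music" with rfl | h12
  · decide
  rcases eq_or_ne k "Religious" with rfl | h13
  · decide
  rcases eq_or_ne k "Star channels" with rfl | h14
  · decide
  rcases eq_or_ne k "Urdhu" with rfl | h15
  · decide
  rcases eq_or_ne k "Weather" with rfl | h16
  · decide
  simp [beq_iff_eq, h1, h2, h3, h4, h5, h6, h7, h8, h9, h10, h11, h12, h13, h14, h15, h16]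

theorem rank_bucket_4 (K : List String) :
    K.filter (fun k => decide (((PySem.List.enumerate pvCategoryOrder).foldl
        (fun d ic => d.insert ic.2 ic.1) PySem.Dict.empty).getD k (pvCategoryOrder.length : Int) = (4 : Int)))
      = K.filter (fun k => k == "documentary") := by
  refine List.filter_congr ?_
  intro k _
  rw [rankOf_cases]
  rcases eq_or_ne k "Bangla" with rfl | h1
  · decide
  rcases eq_or_ne k "News" with rfl | h2
  · decide
  rcases eq_or_ne k "Sports" with rfl | h3
  · decide
  rcases eq_or_ne k "Channels" with rfl | h4
  · decide
  rcases eq_or_ne k "documentary" with rfl | h5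
  · decide
  rcases eq_or_ne k "English" with rfl | h6
  · decide
  rcases eq_or_ne k "Hindi" with rfl | h7
  · decide
  rcases eq_or_ne k "Indian Bangla" with rfl | h8
  · decide
  rcases eq_or_ne k "Kids" with rfl | h9
  · decide
  rcases eq_or_ne k "Latest" with rfl | h10
  · decide
  rcases eq_or_ne k "movie" with rfl | h11
  · decide
  rcases eq_or_ne k "music" with rfl | h12
  · decide
  rcases eq_or_ne k "Religious" with rfl | h13
  · decide
  rcases eq_or_ne k "Star channels" with rfl | h14
  · decide
  rcases eq_or_ne k "Urdhu" with rfl | h15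
  · decide
  rcases eq_or_ne k "Weather" with rfl | h16
  · decide
  simp [beq_iff_eq, h1, h2, h3, h4, h5, h6, h7, h8, h9, h10, h11, h12, h13, h14, h15, h16]

theorem rank_bucket_5 (K : List String) :
    K.filter (fun k => decide (((PySem.List.enumerate pvCategoryOrder).foldl
        (fun d ic => d.insert ic.2 ic.1) PySem.Dict.empty).getD k (pvCategoryOrder.length : Int) = (5 : Int)))
      = K.filter (fun k => k == "English") := by
  refine List.filter_congr ?_
  intro k _
  rw [rankOf_cases]
  rcases eq_or_ne k "Bangla" with rfl | h1
  · decide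
  rcases eq_or_ne k "News" with rfl | h2
  · decide
  rcases eq_or_ne k "Sports" with rfl | h3
  · decide
  rcases eq_or_ne k "Channels" with rfl | h4
  · decide
  rcases eq_or_ne k "documentary" with rfl | h5
  · decide
  rcases eq_or_ne k "English" with rfl | h6
  · decide
  rcases eq_or_ne k "Hindi" with rfl | h7
  · decide
  rcases eq_or_ne k "Indian Bangla" with rfl | h8
  · decide
  rcases eq_or_ne k "Kids" with rfl | h9
  · decide
  rcases eq_or_ne k "Latest" with rfl | h10
  · decide
  rcases eq_or_ne k "movie" with rfl | h11
  · decide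
  rcases eq_or_ne k "music" with rfl | h12
  · decide
  rcases eq_or_ne k "Religious" with rfl | h13
  · decide
  rcases eq_or_ne k "Star channels" with rfl | h14
  · decide
  rcases eq_or_ne k "Urdhu" with rfl | h15
  · decide
  rcases eq_or_ne k "Weather" with rfl | h16
  · decide
  simp [beq_iff_eq, h1, h2, h3, h4, h5, h6, h7, h8, h9, h10, h11, h12, h13, h14, h15, h16]

theorem rank_bucket_6 (K : List String) :
    K.filter (fun k => decide (((PySem.List.enumerate pvCategoryOrder).foldl
        (fun d ic => d.insert ic.2 ic.1) PySem.Dict.empty).getD k (pvCategoryOrder.length : Int) = (6 : Int)))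
      = K.filter (fun k => k == "Hindi") := by
  refine List.filter_congr ?_
  intro k _
  rw [rankOf_cases]
  rcases eq_or_ne k "Bangla" with rfl | h1
  · decide
  rcases eq_or_ne k "News" with rfl | h2
  · decide
  rcases eq_or_ne k "Sports" with rfl | h3
  · decide
  rcases eq_or_ne k "Channels" with rfl | h4
  · decide
  rcases eq_or_ne k "documentary" with rfl | h5
  · decide
  rcases eq_or_ne k "English" with rfl | h6
  · decide
  rcases eq_or_ne k "Hindi" with rfl | h7
  · decide
  rcases eq_or_ne k "Indian Bangla" with rfl | h8
  · decide
  rcases eq_or_ne k "Kids" with rfl | h9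
  · decide
  rcases eq_or_ne k "Latest" with rfl | h10
  · decide
  rcases eq_or_ne k "movie" with rfl | h11
  · decide
  rcases eq_or_ne k "music" with rfl | h12
  · decide
  rcases eq_or_ne k "Religious" with rfl | h13
  · decide
  rcases eq_or_ne k "Star channels" with rfl | h14
  · decide
  rcases eq_or_ne k "Urdhu" with rfl | h15
  · decide
  rcases eq_or_ne k "Weather" with rfl | h16
  · decide
  simp [beq_iff_eq, h1, h2, h3, h4, h5, h6, h7, h8, h9, h10, h11, h12, h13, h14, h15, h16]

theorem rank_bucket_7 (K : List String) :
    K.filter (fun k => decide (((PySem.List.enumerate pvCategoryOrder).foldl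
        (fun d ic => d.insert ic.2 ic.1) PySem.Dict.empty).getD k (pvCategoryOrder.length : Int) = (7 : Int)))
      = K.filter (fun k => k == "Indian Bangla") := by
  refine List.filter_congr ?_
  intro k _
  rw [rankOf_cases]
  rcases eq_or_ne k "Bangla" with rfl | h1
  · decide
  rcases eq_or_ne k "News" with rfl | h2
  · decide
  rcases eq_or_ne k "Sports" with rfl | h3
  · decide
  rcases eq_or_ne k "Channels" with rfl | h4
  · decide
  rcases eq_or_ne k "documentary" with rfl | h5
  · decide
  rcases eq_or_ne k "English" with rfl | h6
  · decide
  rcases eq_or_ne k "Hindi" with rfl | h7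
  · decide
  rcases eq_or_ne k "Indian Bangla" with rfl | h8
  · decide
  rcases eq_or_ne k "Kids" with rfl | h9
  · decide
  rcases eq_or_ne k "Latest" with rfl | h10
  · decide
  rcases eq_or_ne k "movie" with rfl | h11
  · decide
  rcases eq_or_ne k "music" with rfl | h12
  · decide
  rcases eq_or_ne k "Religious" with rfl | h13
  · decide
  rcases eq_or_ne k "Star channels" with rfl | h14
  · decide
  rcases eq_or_ne k "Urdhu" with rfl | h15
  · decide
  rcases eq_or_ne k "Weather" with rfl | h16
  · decide
  simp [beq_iff_eq, h1, h2, h3, h4, h5, h6, h7, h8, h9, h10, h11, h12, h13, h14, h15, h16]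

theorem rank_bucket_8 (K : List String) :
    K.filter (fun k => decide (((PySem.List.enumerate pvCategoryOrder).foldl
        (fun d ic => d.insert ic.2 ic.1) PySem.Dict.empty).getD k (pvCategoryOrder.length : Int) = (8 : Int)))
      = K.filter (fun k => k == "Kids") := by
  refine List.filter_congr ?_
  intro k _
  rw [rankOf_cases]
  rcases eq_or_ne k "Bangla" with rfl | h1
  · decide
  rcases eq_or_ne k "News" with rfl | h2
  · decide
  rcases eq_or_ne k "Sports" with rfl | h3
  · decide
  rcases eq_or_ne k "Channels" with rfl | h4
  · decide
  rcases eq_or_ne k "documentary" with rfl | h5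
  · decide
  rcases eq_or_ne k "English" with rfl | h6
  · decide
  rcases eq_or_ne k "Hindi" with rfl | h7
  · decide
  rcases eq_or_ne k "Indian Bangla" with rfl | h8
  · decide
  rcases eq_or_ne k "Kids" with rfl | h9
  · decide
  rcases eq_or_ne k "Latest" with rfl | h10
  · decide
  rcases eq_or_ne k "movie" with rfl | h11
  · decide
  rcases eq_or_ne k "music" with rfl | h12
  · decide
  rcases eq_or_ne k "Religious" with rfl | h13
  · decide
  rcases eq_or_ne k "Star channels" with rfl | h14
  · decide
  rcases eq_or_ne k "Urdhu" with rfl | h15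
  · decide
  rcases eq_or_ne k "Weather" with rfl | h16
  · decide
  simp [beq_iff_eq, h1, h2, h3, h4, h5, h6, h7, h8, h9, h10, h11, h12, h13, h14, h15, h16]

theorem rank_bucket_9 (K : List String) :
    K.filter (fun k => decide (((PySem.List.enumerate pvCategoryOrder).foldl
        (fun d ic => d.insert ic.2 ic.1) PySem.Dict.empty).getD k (pvCategoryOrder.length : Int) = (9 : Int)))
      = K.filter (fun k => k == "Latest") := by
  refine List.filter_congr ?_
  intro k _
  rw [rankOf_cases]
  rcases eq_or_ne k "Bangla" with rfl | h1
  · decide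
  rcases eq_or_ne k "News" with rfl | h2
  · decide
  rcases eq_or_ne k "Sports" with rfl | h3
  · decide
  rcases eq_or_ne k "Channels" with rfl | h4
  · decide
  rcases eq_or_ne k "documentary" with rfl | h5
  · decide
  rcases eq_or_ne k "English" with rfl | h6
  · decide
  rcases eq_or_ne k "Hindi" with rfl | h7
  · decide
  rcases eq_or_ne k "Indian Bangla" with rfl | h8
  · decide
  rcases eq_or_ne k "Kids" with rfl | h9
  · decide
  rcases eq_or_ne k "Latest" with rfl | h10
  · decide
  rcases eq_or_ne k "movie" with rfl | h11
  · decide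
  rcases eq_or_ne k "music" with rfl | h12
  · decide
  rcases eq_or_ne k "Religious" with rfl | h13
  · decide
  rcases eq_or_ne k "Star channels" with rfl | h14
  · decide
  rcases eq_or_ne k "Urdhu" with rfl | h15
  · decide
  rcases eq_or_ne k "Weather" with rfl | h16
  · decide
  simp [beq_iff_eq, h1, h2, h3, h4, h5, h6, h7, h8, h9, h10, h11, h12, h13, h14, h15, h16]

theorem rank_bucket_10 (K : List String) :
    K.filter (fun k => decide (((PySem.List.enumerate pvCategoryOrder).foldl
        (fun d ic => d.insert ic.2 ic.1) PySem.Dict.empty).getD k (pvCategoryOrder.length : Int) = (10 : Int)))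
      = K.filter (fun k => k == "movie") := by
  refine List.filter_congr ?_
  intro k _
  rw [rankOf_cases]
  rcases eq_or_ne k "Bangla" with rfl | h1
  · decide
  rcases eq_or_ne k "News" with rfl | h2
  · decide
  rcases eq_or_ne k "Sports" with rfl | h3
  · decide
  rcases eq_or_ne k "Channels" with rfl | h4
  · decide
  rcases eq_or_ne k "documentary" with rfl | h5
  · decide
  rcases eq_or_ne k "English" with rfl | h6
  · decide
  rcases eq_or_ne k "Hindi" with rfl | h7
  · decide
  rcases eq_or_ne k "Indian Bangla" with rfl | h8
  · decide
  rcases eq_or_ne k "Kids" with rfl | h9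
  · decide
  rcases eq_or_ne k "Latest" with rfl | h10
  · decide
  rcases eq_or_ne k "movie" with rfl | h11
  · decide
  rcases eq_or_ne k "music" with rfl | h12
  · decide
  rcases eq_or_ne k "Religious" with rfl | h13
  · decide
  rcases eq_or_ne k "Star channels" with rfl | h14
  · decide
  rcases eq_or_ne k "Urdhu" with rfl | h15
  · decide
  rcases eq_or_ne k "Weather" with rfl | h16
  · decide
  simp [beq_iff_eq, h1, h2, h3, h4, h5, h6, h7, h8, h9, h10, h11, h12, h13, h14, h15, h16]

theorem rank_bucket_11 (K : List String) :
    K.filter (fun k => decide (((PySem.List.enumerate pvCategoryOrder).foldl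
        (fun d ic => d.insert ic.2 ic.1) PySem.Dict.empty).getD k (pvCategoryOrder.length : Int) = (11 : Int)))
      = K.filter (fun k => k == "music") := by
  refine List.filter_congr ?_
  intro k _
  rw [rankOf_cases]
  rcases eq_or_ne k "Bangla" with rfl | h1
  · decide
  rcases eq_or_ne k "News" with rfl | h2
  · decide
  rcases eq_or_ne k "Sports" with rfl | h3
  · decide
  rcases eq_or_ne k "Channels" with rfl | h4
  · decide
  rcases eq_or_ne k "documentary" with rfl | h5
  · decide
  rcases eq_or_ne k "English" with rfl | h6
  · decide
  rcases eq_or_ne k "Hindi" with rfl | h7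
  · decide
  rcases eq_or_ne k "Indian Bangla" with rfl | h8
  · decide
  rcases eq_or_ne k "Kids" with rfl | h9
  · decide
  rcases eq_or_ne k "Latest" with rfl | h10
  · decide
  rcases eq_or_ne k "movie" with rfl | h11
  · decide
  rcases eq_or_ne k "music" with rfl | h12
  · decide
  rcases eq_or_ne k "Religious" with rfl | h13
  · decide
  rcases eq_or_ne k "Star channels" with rfl | h14
  · decide
  rcases eq_or_ne k "Urdhu" with rfl | h15
  · decide
  rcases eq_or_ne k "Weather" with rfl | h16
  · decide
  simp [beq_iff_eq, h1, h2, h3, h4, h5, h6, h7, h8, h9, h10, h11, h12, h13, h14, h15, h16]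

theorem rank_bucket_12 (K : List String) :
    K.filter (fun k => decide (((PySem.List.enumerate pvCategoryOrder).foldl
        (fun d ic => d.insert ic.2 ic.1) PySem.Dict.empty).getD k (pvCategoryOrder.length : Int) = (12 : Int)))
      = K.filter (fun k => k == "Religious") := by
  refine List.filter_congr ?_
  intro k _
  rw [rankOf_cases]
  rcases eq_or_ne k "Bangla" with rfl | h1
  · decide
  rcases eq_or_ne k "News" with rfl | h2
  · decide
  rcases eq_or_ne k "Sports" with rfl | h3
  · decide
  rcases eq_or_ne k "Channels" with rfl | h4
  · decide
  rcases eq_or_ne k "documentary" with rfl | h5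
  · decide
  rcases eq_or_ne k "English" with rfl | h6
  · decide
  rcases eq_or_ne k "Hindi" with rfl | h7
  · decide
  rcases eq_or_ne k "Indian Bangla" with rfl | h8
  · decide
  rcases eq_or_ne k "Kids" with rfl | h9
  · decide
  rcases eq_or_ne k "Latest" with rfl | h10
  · decide
  rcases eq_or_ne k "movie" with rfl | h11
  · decide
  rcases eq_or_ne k "music" with rfl | h12
  · decide
  rcases eq_or_ne k "Religious" with rfl | h13
  · decide
  rcases eq_or_ne k "Star channels" with rfl | h14
  · decide
  rcases eq_or_ne k "Urdhu" with rfl | h15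
  · decide
  rcases eq_or_ne k "Weather" with rfl | h16
  · decide
  simp [beq_iff_eq, h1, h2, h3, h4, h5, h6, h7, h8, h9, h10, h11, h12, h13, h14, h15, h16]

theorem rank_bucket_13 (K : List String) :
    K.filter (fun k => decide (((PySem.List.enumerate pvCategoryOrder).foldl
        (fun d ic => d.insert ic.2 ic.1) PySem.Dict.empty).getD k (pvCategoryOrder.length : Int) = (13 : Int)))
      = K.filter (fun k => k == "Star channels") := by
  refine List.filter_congr ?_
  intro k _
  rw [rankOf_cases]
  rcases eq_or_ne k "Bangla" with rfl | h1
  · decide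
  rcases eq_or_ne k "News" with rfl | h2
  · decide
  rcases eq_or_ne k "Sports" with rfl | h3
  · decide
  rcases eq_or_ne k "Channels" with rfl | h4
  · decide
  rcases eq_or_ne k "documentary" with rfl | h5
  · decide
  rcases eq_or_ne k "English" with rfl | h6
  · decide
  rcases eq_or_ne k "Hindi" with rfl | h7
  · decide
  rcases eq_or_ne k "Indian Bangla" with rfl | h8
  · decide
  rcases eq_or_ne k "Kids" with rfl | h9
  · decide
  rcases eq_or_ne k "Latest" with rfl | h10
  · decide
  rcases eq_or_ne k "movie" with rfl | h11
  · decide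
  rcases eq_or_ne k "music" with rfl | h12
  · decide
  rcases eq_or_ne k "Religious" with rfl | h13
  · decide
  rcases eq_or_ne k "Star channels" with rfl | h14
  · decide
  rcases eq_or_ne k "Urdhu" with rfl | h15
  · decide
  rcases eq_or_ne k "Weather" with rfl | h16
  · decide
  simp [beq_iff_eq, h1, h2, h3, h4, h5, h6, h7, h8, h9, h10, h11, h12, h13, h14, h15, h16]

theorem rank_bucket_14 (K : List String) :
    K.filter (fun k => decide (((PySem.List.enumerate pvCategoryOrder).foldl
        (fun d ic => d.insert ic.2 ic.1) PySem.Dict.empty).getD k (pvCategoryOrder.length : Int) = (14 : Int)))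
      = K.filter (fun k => k == "Urdhu") := by
  refine List.filter_congr ?_
  intro k _
  rw [rankOf_cases]
  rcases eq_or_ne k "Bangla" with rfl | h1
  · decide
  rcases eq_or_ne k "News" with rfl | h2
  · decide
  rcases eq_or_ne k "Sports" with rfl | h3
  · decide
  rcases eq_or_ne k "Channels" with rfl | h4
  · decide
  rcases eq_or_ne k "documentary" with rfl | h5
  · decide
  rcases eq_or_ne k "English" with rfl | h6
  · decide
  rcases eq_or_ne k "Hindi" with rfl | h7
  · decide
  rcases eq_or_ne k "Indian Bangla" with rfl | h8
  · decide
  rcases eq_or_ne k "Kids" with rfl | h9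
  · decide
  rcases eq_or_ne k "Latest" with rfl | h10
  · decide
  rcases eq_or_ne k "movie" with rfl | h11
  · decide
  rcases eq_or_ne k "music" with rfl | h12
  · decide
  rcases eq_or_ne k "Religious" with rfl | h13
  · decide
  rcases eq_or_ne k "Star channels" with rfl | h14
  · decide
  rcases eq_or_ne k "Urdhu" with rfl | h15
  · decide
  rcases eq_or_ne k "Weather" with rfl | h16
  · decide
  simp [beq_iff_eq, h1, h2, h3, h4, h5, h6, h7, h8, h9, h10, h11, h12, h13, h14, h15, h16]

theorem rank_bucket_15 (K : List String) :
    K.filter (fun k => decide (((PySem.List.enumerate pvCategoryOrder).foldl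
        (fun d ic => d.insert ic.2 ic.1) PySem.Dict.empty).getD k (pvCategoryOrder.length : Int) = (15 : Int)))
      = K.filter (fun k => k == "Weather") := by
  refine List.filter_congr ?_
  intro k _
  rw [rankOf_cases]
  rcases eq_or_ne k "Bangla" with rfl | h1
  · decide
  rcases eq_or_ne k "News" with rfl | h2
  · decide
  rcases eq_or_ne k "Sports" with rfl | h3
  · decide
  rcases eq_or_ne k "Channels" with rfl | h4
  · decide
  rcases eq_or_ne k "documentary" with rfl | h5
  · decide
  rcases eq_or_ne k "English" with rfl | h6
  · decide
  rcases eq_or_ne k "Hindi" with rfl | h7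
  · decide
  rcases eq_or_ne k "Indian Bangla" with rfl | h8
  · decide
  rcases eq_or_ne k "Kids" with rfl | h9
  · decide
  rcases eq_or_ne k "Latest" with rfl | h10
  · decide
  rcases eq_or_ne k "movie" with rfl | h11
  · decide
  rcases eq_or_ne k "music" with rfl | h12
  · decide
  rcases eq_or_ne k "Religious" with rfl | h13
  · decide
  rcases eq_or_ne k "Star channels" with rfl | h14
  · decide
  rcases eq_or_ne k "Urdhu" with rfl | h15
  · decide
  rcases eq_or_ne k "Weather" with rfl | h16
  · decide
  simp [beq_iff_eq, h1, h2, h3, h4, h5, h6, h7, h8, h9, h10, h11, h12, h13, h14, h15, h16]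

theorem rank_bucket_16 (K : List String) :
    K.filter (fun k => decide (((PySem.List.enumerate pvCategoryOrder).foldl
        (fun d ic => d.insert ic.2 ic.1) PySem.Dict.empty).getD k (pvCategoryOrder.length : Int) = (16 : Int)))
      = K.filter (fun k => !pvCategoryOrder.contains k) := by
  refine List.filter_congr ?_
  intro k _
  rw [rankOf_cases]
  rcases eq_or_ne k "Bangla" with rfl | h1
  · decide
  rcases eq_or_ne k "News" with rfl | h2
  · decide
  rcases eq_or_ne k "Sports" with rfl | h3
  · decide
  rcases eq_or_ne k "Channels" with rfl | h4
  · decide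
  rcases eq_or_ne k "documentary" with rfl | h5
  · decide
  rcases eq_or_ne k "English" with rfl | h6
  · decide
  rcases eq_or_ne k "Hindi" with rfl | h7
  · decide
  rcases eq_or_ne k "Indian Bangla" with rfl | h8
  · decide
  rcases eq_or_ne k "Kids" with rfl | h9
  · decide
  rcases eq_or_ne k "Latest" with rfl | h10
  · decide
  rcases eq_or_ne k "movie" with rfl | h11
  · decide
  rcases eq_or_ne k "music" with rfl | h12
  · decide
  rcases eq_or_ne k "Religious" with rfl | h13
  · decide
  rcases eq_or_ne k "Star channels" with rfl | h14
  · decide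
  rcases eq_or_ne k "Urdhu" with rfl | h15
  · decide
  rcases eq_or_ne k "Weather" with rfl | h16
  · decide
  simp [pvCategoryOrder, beq_iff_eq, h1, h2, h3, h4, h5, h6, h7, h8, h9, h10, h11, h12, h13, h14, h15, h16]


theorem filter_map_eq_flatMap {α β : Type} (co : List α) (p : α → Bool) (f : α → β) :
    (co.filter p).map f = co.flatMap (fun c => if p c then [f c] else []) := by
  induction co with
  | nil => rfl
  | cons c co ih =>
      simp only [List.filter_cons, List.flatMap_cons, ← ih]
      by_cases h : p c = true
      · simp [h]
      · simp [h]

theorem filter_beq_nodup (K : List String) (hK : K.Nodup) (c : String) :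
    K.filter (fun k => k == c) = if K.contains c then [c] else [] := by
  induction K with
  | nil => rfl
  | cons k K ih =>
      simp only [List.nodup_cons] at hK
      by_cases h : k = c
      · subst h
        have : K.filter (fun x => x == k) = [] := by
          refine List.filter_eq_nil_iff.mpr ?_
          intro a ha
          simp only [beq_iff_eq]
          intro e
          exact hK.1 (e ▸ ha)
        simp [List.filter_cons, this]
      · simp [List.filter_cons, h, ih hK.2, List.contains_cons, Ne.symm h]

theorem rank_bounds (k : String) :
    0 ≤ ((PySem.List.enumerate pvCategoryOrder).foldl (fun d ic => d.insert ic.2 ic.1)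
        PySem.Dict.empty).getD k (pvCategoryOrder.length : Int)
      ∧ ((PySem.List.enumerate pvCategoryOrder).foldl (fun d ic => d.insert ic.2 ic.1)
        PySem.Dict.empty).getD k (pvCategoryOrder.length : Int) ≤ (16 : Int) := by
  rw [rankOf_cases]
  rcases eq_or_ne k "Bangla" with rfl | h1
  · decide
  rcases eq_or_ne k "News" with rfl | h2
  · decide
  rcases eq_or_ne k "Sports" with rfl | h3
  · decide
  rcases eq_or_ne k "Channels" with rfl | h4
  · decide
  rcases eq_or_ne k "documentary" with rfl | h5
  · decide
  rcases eq_or_ne k "English" with rfl | h6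
  · decide
  rcases eq_or_ne k "Hindi" with rfl | h7
  · decide
  rcases eq_or_ne k "Indian Bangla" with rfl | h8
  · decide
  rcases eq_or_ne k "Kids" with rfl | h9
  · decide
  rcases eq_or_ne k "Latest" with rfl | h10
  · decide
  rcases eq_or_ne k "movie" with rfl | h11
  · decide
  rcases eq_or_ne k "music" with rfl | h12
  · decide
  rcases eq_or_ne k "Religious" with rfl | h13
  · decide
  rcases eq_or_ne k "Star channels" with rfl | h14
  · decide
  rcases eq_or_ne k "Urdhu" with rfl | h15
  · decide
  rcases eq_or_ne k "Weather" with rfl | h16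
  · decide
  rw [if_neg h1, if_neg h2, if_neg h3, if_neg h4, if_neg h5, if_neg h6, if_neg h7, if_neg h8, if_neg h9, if_neg h10, if_neg h11, if_neg h12, if_neg h13, if_neg h14, if_neg h15, if_neg h16]
  omega

theorem generate_count_eq_aux (channels : List (List (String × String))) :
    generate_count channels = generate_count_alt channels := by
  simp only [generate_count, generate_count_alt]
  have hcount : (channels.foldl (fun d ch => d.modify (pvCat ch) 0 (· + 1)) PySem.Dict.empty)
      = PySem.Dict.counter (channels.map pvCat) := by
    rw [PySem.Dict.counter_eq_foldl, List.foldl_map]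
  rw [hcount]
  set cats := channels.map pvCat with hcats
  set count := PySem.Dict.counter cats with hcnt
  rw [foldl_insert_if_filter pvCategoryOrder (fun cat => count.contains cat) (fun c => c)
        (fun c => count.getD c 0)]
  rw [foldl_skip_if_filter count.items (fun kv => pvCategoryOrder.contains kv.1) Prod.fst Prod.snd]
  have e1 : (List.foldl (fun r x => r.insert x (count.getD x 0))
        (PySem.Dict.mk [("total", (channels.length : Int))])
        (pvCategoryOrder.filter (fun cat => count.contains cat)))
      = List.foldl (fun r kv => r.insert kv.1 kv.2)
        (PySem.Dict.mk [("total", (channels.length : Int))])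
        ((pvCategoryOrder.filter (fun cat => count.contains cat)).map
          (fun c => (c, count.getD c 0))) := by
    rw [List.foldl_map]
  rw [e1, ← List.foldl_append]
  rw [sorted_eq_flatMap_buckets count.items _ 16
      (by intro kv _; exact_mod_cast rank_bounds kv.1)]
  refine congrArg (fun L => (List.foldl
      (fun (r : PySem.Dict String Int) (kv : String × Int) => r.insert kv.1 kv.2)
      (PySem.Dict.mk [("total", (channels.length : Int))]) L).items) ?_
  simp only [hcnt, PySem.Dict.items_counter, PySem.Dict.getD_counter, PySem.Dict.contains_counter]
  rw [show List.range (16 + 1) = [0,1,2,3,4,5,6,7,8,9,10,11,12,13,14,15,16] from rfl]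
  simp only [List.flatMap_cons, List.flatMap_nil, List.append_nil, Nat.cast_ofNat,
    Nat.cast_zero, Nat.cast_one]
  simp only [List.filter_map, Function.comp_def]
  rw [rank_bucket_0, rank_bucket_1, rank_bucket_2, rank_bucket_3, rank_bucket_4, rank_bucket_5, rank_bucket_6, rank_bucket_7, rank_bucket_8, rank_bucket_9, rank_bucket_10, rank_bucket_11, rank_bucket_12, rank_bucket_13, rank_bucket_14, rank_bucket_15, rank_bucket_16]
  rw [filter_map_eq_flatMap]
  simp only [filter_beq_nodup _ (PySem.Set.nodup_ofList cats)]
  simp only [pvCategoryOrder, List.flatMap_cons, List.flatMap_nil, List.append_nil]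
  simp only [List.contains_eq_mem, PySem.Set.mem_ofList,
    apply_ite (List.map (fun c => (c, (List.count c cats : Int)))), List.map_cons, List.map_nil]
  simp [List.append_assoc]

-- ===== VERDICT (by name: the statement is the Claim_ definition above) =====
theorem generate_count_spec : Claim_equal_generate_count := by
  intro channels _ _
  exact generate_count_eq_aux channels
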